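-- pv_equiv track=rewrite | github.com/ServiceLayerNetworking/SLATE | global-controller/global_controller.py | get_svc_to_placement
-- ===== SOURCE A (Python) =====
-- def get_svc_to_placement(all_endpoints):
--     temp = dict()
--     for region in all_endpoints:
--         for svc_name in all_endpoints[region]:
--             if svc_name not in temp:
--                 temp[svc_name] = set()
--             temp[svc_name].add(region)
--     return temp
-- ===== SOURCE B (Python) =====
-- def get_svc_to_placement(all_endpoints):
--     # collect service names in first-appearance order, then find each service's regions by scanning regions
--     services = list(dict.fromkeys(svc for eps in all_endpoints.values() for svc in eps))
--     return {svc: {r for r, eps in all_endpoints.items() if svc in eps}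
--             for svc in services}
-- ===== Notes on version B (the rewrite author's own statement) =====
-- stated objective: alternative
-- what changed: B inverts the traversal: instead of A's per-(region,service) placement into a growing dict of sets, B first collects the distinct service names and then, per service, scans the regions once and gathers the regions whose endpoint map contains it.
import Mathlib
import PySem

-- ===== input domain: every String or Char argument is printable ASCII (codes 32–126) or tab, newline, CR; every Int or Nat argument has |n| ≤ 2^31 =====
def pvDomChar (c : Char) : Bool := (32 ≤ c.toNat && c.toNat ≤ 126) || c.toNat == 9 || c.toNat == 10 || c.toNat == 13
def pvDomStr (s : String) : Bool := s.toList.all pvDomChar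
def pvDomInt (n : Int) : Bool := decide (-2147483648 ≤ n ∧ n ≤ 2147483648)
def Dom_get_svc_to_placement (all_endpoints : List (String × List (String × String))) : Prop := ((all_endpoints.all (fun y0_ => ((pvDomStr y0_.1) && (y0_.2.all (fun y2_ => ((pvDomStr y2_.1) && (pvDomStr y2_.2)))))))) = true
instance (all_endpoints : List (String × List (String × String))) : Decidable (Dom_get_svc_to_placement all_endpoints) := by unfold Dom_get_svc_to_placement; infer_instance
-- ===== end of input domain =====

-- B inverts the traversal: it first collects the service names, then scans the regions once per service;
-- objective: alternative decomposition (per-service region scan instead of per-pair placement), same result.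


-- ===== PORT A =====
-- temp[svc] is a Python set of regions → PySem.Set String
def get_svc_to_placement (all_endpoints : List (String × List (String × String))) : List (String × List String) :=
  (all_endpoints.foldl
    (fun temp region =>
      region.2.foldl
        (fun temp svc_name =>
          let temp1 := if temp.contains svc_name.1 then temp
                       else temp.insert svc_name.1 PySem.Set.empty
          temp1.modify svc_name.1 PySem.Set.empty (fun s => PySem.Set.add s region.1))
        temp)
    PySem.Dict.empty).items

-- ===== PORT B =====
-- services = list(dict.fromkeys(svc for eps in all_endpoints.values() for svc in eps))
-- {svc: {r for r, eps in all_endpoints.items() if svc in eps} for svc in services}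
def get_svc_to_placement_alt (all_endpoints : List (String × List (String × String))) : List (String × List String) :=
  let services := PySem.List.dedup (all_endpoints.flatMap (fun rp => rp.2.map Prod.fst))
  services.map (fun svc =>
    (svc, PySem.Set.ofList
            ((all_endpoints.filter (fun rp => (rp.2.map Prod.fst).contains svc)).map Prod.fst)))

-- ===== PRECONDITION & SPEC =====
def Spec_get_svc_to_placement (all_endpoints : List (String × List (String × String))) (out : List (String × List String)) : Prop := out = get_svc_to_placement_alt all_endpoints
instance (all_endpoints : List (String × List (String × String))) (out : List (String × List String)) : Decidable (Spec_get_svc_to_placement all_endpoints out) := by unfold Spec_get_svc_to_placement; infer_instance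

-- ===== CLAIM (what is proved, stated in full; the proofs are below) =====
def Claim_equal_get_svc_to_placement : Prop := ∀ (all_endpoints : List (String × List (String × String))), Dom_get_svc_to_placement all_endpoints → Spec_get_svc_to_placement all_endpoints (get_svc_to_placement all_endpoints)

-- ===== LEMMAS AND PROOFS =====

theorem pv_add_add_self (s : PySem.Set String) (r : String) :
    PySem.Set.add (PySem.Set.add s r) r = PySem.Set.add s r := by
  simp [PySem.Set.add]
  split_ifs with h1 <;> simp_all

theorem pv_foldl_add_aux : ∀ (n : Nat) (M acc : List String), M.length ≤ n →
    M.foldl PySem.Set.add acc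
      = acc ++ PySem.List.dedup (M.filter (fun y => !acc.contains y)) := by
  intro n
  induction n with
  | zero => intro M acc h; simp at h; subst h; simp [PySem.List.dedup, PySem.Set.ofList, PySem.Set.empty]
  | succ n ih =>
    intro M acc h
    match M with
    | [] => simp [PySem.List.dedup, PySem.Set.ofList, PySem.Set.empty]
    | x :: M' =>
      have hM' : M'.length ≤ n := by simpa using Nat.le_of_succ_le_succ (by simpa using h)
      simp only [List.foldl_cons]
      by_cases hc : x ∈ acc
      · have hstep : PySem.Set.add acc x = acc := by simp [PySem.Set.add, hc]
        rw [hstep, ih M' acc hM']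
        simp [List.filter_cons, hc]
      · have hadd : PySem.Set.add acc x = acc ++ [x] := by simp [PySem.Set.add, hc]
        rw [hadd, ih M' (acc ++ [x]) hM']
        have hfil : M'.filter (fun y => !(acc ++ [x]).contains y)
            = (M'.filter (fun y => !acc.contains y)).filter (fun y => !(y == x)) := by
          rw [List.filter_filter]
          apply List.filter_congr
          intro y _
          by_cases hyx : y = x <;> simp [hyx, Bool.and_comm]
        rw [hfil]
        have hN : (M'.filter (fun y => !acc.contains y)).length ≤ n := by
          have := List.length_filter_le (fun y => !acc.contains y) M'
          omega
        have h2 := ih (M'.filter (fun y => !acc.contains y)) [x] hN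
        simp only [List.filter_cons, hc]
        simp only [PySem.List.dedup, PySem.Set.ofList, PySem.Set.empty] at h2 ⊢
        have hax : PySem.Set.add ([] : List String) x = [x] := by simp [PySem.Set.add]
        have hcontains : (M'.filter (fun y => !acc.contains y)).filter (fun y => !([x].contains y))
            = (M'.filter (fun y => !acc.contains y)).filter (fun y => !(y == x)) := by
          apply List.filter_congr; intro y _
          by_cases hyx : y = x <;> simp [hyx]
        rw [hcontains] at h2
        rw [if_pos (show (!acc.contains x) = true by simpa using hc), List.foldl_cons, hax, h2]
        simp [List.append_assoc]


def pvStepA (r : String) (t : PySem.Dict String (PySem.Set String)) (svc : String) :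
    PySem.Dict String (PySem.Set String) :=
  let t1 := if t.contains svc then t else t.insert svc PySem.Set.empty
  t1.modify svc PySem.Set.empty (fun s => PySem.Set.add s r)

theorem pv_foldl_add_eq_append (M acc : List String) :
    M.foldl PySem.Set.add acc
      = acc ++ PySem.List.dedup (M.filter (fun y => !acc.contains y)) :=
  pv_foldl_add_aux M.length M acc le_rfl

theorem pv_not_contains_ne (t : PySem.Dict String (PySem.Set String)) (svc : String)
    (h : t.contains svc = false) : ∀ p ∈ t.items, p.1 ≠ svc := by
  intro p hp he
  have : t.items.any (fun q => q.1 == svc) = true := List.any_of_mem hp (by simp [he])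
  rw [show t.items.any (fun q => q.1 == svc) = t.contains svc from rfl, h] at this
  exact Bool.false_ne_true this

theorem pvStepA_items_of_contains (r : String) (t : PySem.Dict String (PySem.Set String))
    (svc : String) (h : t.contains svc = true) (hnd : t.keys.Nodup) :
    (pvStepA r t svc).items
      = t.items.map (fun p => if p.1 = svc then (p.1, PySem.Set.add p.2 r) else p) := by
  simp only [pvStepA, h, if_pos, PySem.Dict.modify]
  rw [PySem.Dict.items_insert_of_contains t _ h]
  apply List.map_congr_left
  intro p hp
  by_cases hps : p.1 = svc
  · have hg : t.getD svc ([] : PySem.Set String) = p.2 := by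
      have := PySem.Dict.getD_of_mem_items t (k := p.1) (v := p.2) (by simpa using hp) hnd ([] : PySem.Set String)
      simpa [hps] using this
    simp [hps, hg, PySem.Set.empty]
  · simp [hps]

theorem pvStepA_items_of_not_contains (r : String) (t : PySem.Dict String (PySem.Set String))
    (svc : String) (h : t.contains svc = false) :
    (pvStepA r t svc).items = t.items ++ [(svc, [r])] := by
  have hne := pv_not_contains_ne t svc h
  simp only [pvStepA, h, Bool.false_eq_true, if_neg, if_false, PySem.Dict.modify]
  have h1 : (t.insert svc PySem.Set.empty).items = t.items ++ [(svc, PySem.Set.empty)] :=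
    PySem.Dict.items_insert_of_not_contains t _ h
  rw [PySem.Dict.getD_insert_self,
      PySem.Dict.items_insert_of_contains _ _ (PySem.Dict.contains_insert_self t svc _), h1,
      List.map_append]
  congr 1
  · conv_rhs => rw [← List.map_id t.items]
    apply List.map_congr_left
    intro p hp
    simp [hne p hp]
  · simp [PySem.Set.add, PySem.Set.empty]

theorem pvStepA_keys_of_contains (r : String) (t : PySem.Dict String (PySem.Set String))
    (svc : String) (h : t.contains svc = true) (hnd : t.keys.Nodup) :
    (pvStepA r t svc).keys = t.keys := by
  simp only [PySem.Dict.keys, pvStepA_items_of_contains r t svc h hnd, List.map_map]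
  apply List.map_congr_left
  intro p _
  by_cases hps : p.1 = svc <;> simp [hps]

theorem pvStepA_keys_of_not_contains (r : String) (t : PySem.Dict String (PySem.Set String))
    (svc : String) (h : t.contains svc = false) :
    (pvStepA r t svc).keys = t.keys ++ [svc] := by
  simp [PySem.Dict.keys, pvStepA_items_of_not_contains r t svc h]

theorem pv_contains_iff (t : PySem.Dict String (PySem.Set String)) (x : String) :
    t.contains x = decide (x ∈ t.keys) := PySem.Dict.contains_eq_decide_mem_keys t x

theorem pv_inner : ∀ (L : List String) (d : PySem.Dict String (PySem.Set String)) (r : String),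
    d.keys.Nodup →
    (L.foldl (pvStepA r) d).items
      = d.items.map (fun p => if L.contains p.1 then (p.1, PySem.Set.add p.2 r) else p)
        ++ (PySem.List.dedup (L.filter (fun s => !d.contains s))).map (fun s => (s, [r])) := by
  intro L
  induction L with
  | nil => intro d r hnd; simp [PySem.List.dedup, PySem.Set.ofList, PySem.Set.empty]
  | cons s L' ih =>
    intro d r hnd
    simp only [List.foldl_cons]
    by_cases hc : d.contains s = true
    · have hkeys := pvStepA_keys_of_contains r d s hc hnd
      have hnd' : (pvStepA r d s).keys.Nodup := hkeys ▸ hnd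
      rw [ih (pvStepA r d s) r hnd', pvStepA_items_of_contains r d s hc hnd, List.map_map]
      have hcontains' : ∀ x, (pvStepA r d s).contains x = d.contains x := by
        intro x; rw [pv_contains_iff, pv_contains_iff, hkeys]
      congr 1
      · apply List.map_congr_left
        intro p _
        by_cases hps : p.1 = s
        · simp [hps, pv_add_add_self]
        · simp [hps]
      · have h1 : L'.filter (fun y => !(pvStepA r d s).contains y)
              = L'.filter (fun y => !d.contains y) := by
          apply List.filter_congr; intro y _; rw [hcontains' y]
        have h2 : (s :: L').filter (fun y => !d.contains y)
              = L'.filter (fun y => !d.contains y) := by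
          simp [List.filter_cons, hc]
        rw [h1, h2]
    · have hc' : d.contains s = false := by simpa using hc
      have hkeys := pvStepA_keys_of_not_contains r d s hc'
      have hsk : s ∉ d.keys := by
        rw [pv_contains_iff] at hc'; simpa using hc'
      have hnd' : (pvStepA r d s).keys.Nodup := by
        rw [hkeys]
        simp only [List.nodup_append, List.nodup_singleton, true_and, and_true]
        refine ⟨hnd, ?_⟩
        intro a ha b hb
        simp only [List.mem_singleton] at hb
        subst hb
        intro hae
        exact hsk (hae ▸ ha)
      have hne := pv_not_contains_ne d s hc'
      rw [ih (pvStepA r d s) r hnd', pvStepA_items_of_not_contains r d s hc']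
      have hcontains' : ∀ x, (pvStepA r d s).contains x = (d.contains x || (x == s)) := by
        intro x
        rw [pv_contains_iff, pv_contains_iff, hkeys]
        by_cases hx : x = s <;> simp [hx, List.mem_append]
      rw [List.map_append]
      have hmap1 : d.items.map (fun p => if L'.contains p.1 then (p.1, PySem.Set.add p.2 r) else p)
          = d.items.map (fun p => if (s :: L').contains p.1 then (p.1, PySem.Set.add p.2 r) else p) := by
        apply List.map_congr_left
        intro p hp
        have : ¬ (p.1 = s) := hne p hp
        simp [List.contains_cons, this]
      have hsr : ((fun p => if L'.contains p.1 then (p.1, PySem.Set.add p.2 r) else p)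
                    ((s, [r]) : String × PySem.Set String)) = (s, [r]) := by
        by_cases hl : L'.contains s = true <;> simp [hl, PySem.Set.add]
      have hfil2 : L'.filter (fun y => !(pvStepA r d s).contains y)
          = (L'.filter (fun y => !d.contains y)).filter (fun y => !(y == s)) := by
        rw [List.filter_filter]
        apply List.filter_congr
        intro y _
        rw [hcontains' y]
        by_cases hys : y = s <;> simp [hys, Bool.and_comm]
      have hded : PySem.List.dedup ((s :: L').filter (fun y => !d.contains y))
          = s :: PySem.List.dedup ((L'.filter (fun y => !d.contains y)).filter (fun y => !(y == s))) := by
        simp only [List.filter_cons, hc', Bool.not_false, if_pos, decide_true]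
        have hh : PySem.List.dedup (s :: (L'.filter (fun y => !d.contains y)))
            = [s] ++ PySem.List.dedup ((L'.filter (fun y => !d.contains y)).filter (fun y => !([s].contains y))) := by
          simp only [PySem.List.dedup, PySem.Set.ofList, List.foldl_cons, PySem.Set.empty]
          rw [show PySem.Set.add ([] : List String) s = [s] by simp [PySem.Set.add]]
          exact pv_foldl_add_eq_append _ [s]
        rw [hh, List.singleton_append]
        congr 2
        apply List.filter_congr
        intro y _
        by_cases hys : y = s <;> simp [hys]
      rw [hmap1.symm] at *
      rw [hfil2, hded]
      simp only [List.map_cons, hsr, List.map_append]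
      rw [hmap1]
      simp [List.append_assoc]


theorem pv_dedup_append (P Q : List String) :
    PySem.List.dedup (P ++ Q)
      = PySem.List.dedup P ++ PySem.List.dedup (Q.filter (fun y => !(PySem.List.dedup P).contains y)) := by
  simp only [PySem.List.dedup, PySem.Set.ofList, PySem.Set.empty, List.foldl_append]
  exact pv_foldl_add_eq_append Q _

theorem pv_main' : ∀ (ae : List (String × List (String × String)))
    (d : PySem.Dict String (PySem.Set String)), d.keys.Nodup →
    (ae.foldl (fun temp region => (region.2.map Prod.fst).foldl (pvStepA region.1) temp) d).items
    = d.items.map (fun p =>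
        (p.1, ((ae.filter (fun rp => (rp.2.map Prod.fst).contains p.1)).map Prod.fst).foldl PySem.Set.add p.2))
      ++ (PySem.List.dedup ((ae.flatMap (fun rp => rp.2.map Prod.fst)).filter (fun s => !d.contains s))).map
          (fun s => (s, PySem.Set.ofList ((ae.filter (fun rp => (rp.2.map Prod.fst).contains s)).map Prod.fst))) := by
  intro ae
  induction ae with
  | nil =>
    intro d hnd
    simp [PySem.List.dedup, PySem.Set.ofList, PySem.Set.empty]
  | cons rp rest ih =>
    intro d hnd
    obtain ⟨r, eps⟩ := rp
    set L := eps.map Prod.fst with hL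
    set d1 := L.foldl (pvStepA r) d with hd1
    have hitems1 : d1.items
        = d.items.map (fun p => if L.contains p.1 then (p.1, PySem.Set.add p.2 r) else p)
          ++ (PySem.List.dedup (L.filter (fun s => !d.contains s))).map (fun s => (s, [r])) :=
      pv_inner L d r hnd
    have hkeys1 : d1.keys = d.keys ++ PySem.List.dedup (L.filter (fun s => !d.contains s)) := by
      simp only [PySem.Dict.keys, hitems1, List.map_append, List.map_map]
      congr 1
      · apply List.map_congr_left; intro p _
        simp only [Function.comp_apply]
        split_ifs <;> simp
      · simp [Function.comp_def]
    have hmemded : ∀ x, x ∈ PySem.List.dedup (L.filter (fun s => !d.contains s)) ↔ (x ∈ L ∧ ¬ x ∈ d.keys) := by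
      intro x
      rw [show PySem.List.dedup (L.filter (fun s => !d.contains s)) = PySem.Set.ofList (L.filter (fun s => !d.contains s)) from rfl,
         PySem.Set.mem_ofList, List.mem_filter]
      simp [pv_contains_iff]
    have hnd1 : d1.keys.Nodup := by
      rw [hkeys1, List.nodup_append]
      refine ⟨hnd, PySem.List.nodup_dedup _, ?_⟩
      intro a ha b hb hab
      exact ((hmemded b).1 hb).2 (hab ▸ ha)
    have hcont1 : ∀ x, d1.contains x = (d.contains x || L.contains x) := by
      intro x
      rw [pv_contains_iff, pv_contains_iff, hkeys1]
      by_cases hxk : x ∈ d.keys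
      · simp [hxk, pv_contains_iff]
      · by_cases hxL : x ∈ L <;> simp [hxk, hxL, hmemded, pv_contains_iff]
    simp only [List.foldl_cons]
    rw [← hL, ← hd1, ih d1 hnd1]
    rw [hitems1, List.map_append, List.map_map, List.map_map]
    have hA : d.items.map ((fun p => (p.1,
          ((rest.filter (fun rp => (rp.2.map Prod.fst).contains p.1)).map Prod.fst).foldl PySem.Set.add p.2))
            ∘ (fun p => if L.contains p.1 then (p.1, PySem.Set.add p.2 r) else p))
        = d.items.map (fun p => (p.1,
          ((((r, eps) :: rest).filter (fun rp => (rp.2.map Prod.fst).contains p.1)).map Prod.fst).foldl PySem.Set.add p.2)) := by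
      apply List.map_congr_left
      intro p _
      simp only [Function.comp_apply, List.filter_cons, ← hL]
      by_cases hps : p.1 ∈ L <;> simp [hps]
    have hB : (PySem.List.dedup (L.filter (fun s => !d.contains s))).map
          ((fun p => (p.1,
            ((rest.filter (fun rp => (rp.2.map Prod.fst).contains p.1)).map Prod.fst).foldl PySem.Set.add p.2))
              ∘ (fun s => (s, ([r] : PySem.Set String))))
        = (PySem.List.dedup (L.filter (fun s => !d.contains s))).map
            (fun s => (s, PySem.Set.ofList
              ((((r, eps) :: rest).filter (fun rp => (rp.2.map Prod.fst).contains s)).map Prod.fst))) := by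
      apply List.map_congr_left
      intro x hx
      have hxL : x ∈ L := ((hmemded x).1 hx).1
      simp only [Function.comp_apply, List.filter_cons, ← hL]
      have : L.contains x = true := by simpa using hxL
      simp only [this, if_pos, decide_true, List.map_cons,
        PySem.Set.ofList, PySem.Set.empty, List.foldl_cons]
      rw [show PySem.Set.add ([] : List String) r = [r] by simp [PySem.Set.add]]
    have hC : (rest.flatMap (fun rp => rp.2.map Prod.fst)).filter (fun s => !d1.contains s)
        = ((rest.flatMap (fun rp => rp.2.map Prod.fst)).filter (fun s => !d.contains s)).filter
            (fun y => !(PySem.List.dedup (L.filter (fun s => !d.contains s))).contains y) := by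
      rw [List.filter_filter]
      apply List.filter_congr
      intro y _
      rw [hcont1 y]
      have hmem := hmemded y
      rw [pv_contains_iff d y]
      by_cases hyk : y ∈ d.keys
      · simp [hyk, pv_contains_iff]
      · by_cases hyL : y ∈ L <;> simp [hyk, hyL, hmem, pv_contains_iff]
    have hD : PySem.List.dedup (((L ++ rest.flatMap (fun rp => rp.2.map Prod.fst))).filter (fun s => !d.contains s))
        = PySem.List.dedup (L.filter (fun s => !d.contains s))
          ++ PySem.List.dedup ((rest.flatMap (fun rp => rp.2.map Prod.fst)).filter (fun s => !d1.contains s)) := by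
      rw [List.filter_append, pv_dedup_append, hC]
    have hE : (PySem.List.dedup ((rest.flatMap (fun rp => rp.2.map Prod.fst)).filter (fun s => !d1.contains s))).map
          (fun s => (s, PySem.Set.ofList ((rest.filter (fun rp => (rp.2.map Prod.fst).contains s)).map Prod.fst)))
        = (PySem.List.dedup ((rest.flatMap (fun rp => rp.2.map Prod.fst)).filter (fun s => !d1.contains s))).map
            (fun s => (s, PySem.Set.ofList
              ((((r, eps) :: rest).filter (fun rp => (rp.2.map Prod.fst).contains s)).map Prod.fst))) := by
      apply List.map_congr_left
      intro x hx
      have hxnL : ¬ x ∈ L := by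
        have := (PySem.Set.mem_ofList _ x).mp hx
        rw [List.mem_filter] at this
        have h2 := this.2
        rw [hcont1 x] at h2
        intro hxl
        simp [hxl] at h2
      simp only [List.filter_cons, ← hL]
      simp [hxnL]
    rw [hA, hB, hE, List.flatMap_cons, ← hL, hD, List.map_append, List.append_assoc]

theorem pv_main (ae : List (String × List (String × String)))
    (d : PySem.Dict String (PySem.Set String)) (hnd : d.keys.Nodup) :
    (ae.foldl
      (fun temp region =>
        region.2.foldl
          (fun temp svc_name =>
            let temp1 := if temp.contains svc_name.1 then temp
                         else temp.insert svc_name.1 PySem.Set.empty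
            temp1.modify svc_name.1 PySem.Set.empty (fun s => PySem.Set.add s region.1))
          temp)
      d).items
    = d.items.map (fun p =>
        (p.1, ((ae.filter (fun rp => (rp.2.map Prod.fst).contains p.1)).map Prod.fst).foldl PySem.Set.add p.2))
      ++ (PySem.List.dedup ((ae.flatMap (fun rp => rp.2.map Prod.fst)).filter (fun s => !d.contains s))).map
          (fun s => (s, PySem.Set.ofList ((ae.filter (fun rp => (rp.2.map Prod.fst).contains s)).map Prod.fst))) := by
  have hfun : (fun (temp : PySem.Dict String (PySem.Set String)) (region : String × List (String × String)) =>
      region.2.foldl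
        (fun temp svc_name =>
          let temp1 := if temp.contains svc_name.1 then temp
                       else temp.insert svc_name.1 PySem.Set.empty
          temp1.modify svc_name.1 PySem.Set.empty (fun s => PySem.Set.add s region.1))
        temp)
      = (fun temp region => (region.2.map Prod.fst).foldl (pvStepA region.1) temp) := by
    funext temp region
    rw [List.foldl_map]
    rfl
  rw [hfun]
  exact pv_main' ae d hnd

-- ===== VERDICT (by name: the statement is the Claim_ definition above) =====
theorem get_svc_to_placement_spec : Claim_equal_get_svc_to_placement := by
  intro ae _
  unfold Spec_get_svc_to_placement get_svc_to_placement get_svc_to_placement_alt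
  rw [pv_main ae PySem.Dict.empty (by simp [PySem.Dict.keys, PySem.Dict.empty])]
  simp [PySem.Dict.empty, PySem.Dict.contains]
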